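-- pv_equiv track=rewrite | github.com/erturkmemmedli/Leet-Code-Solutions | 1001-1500/1318_minFlips.py | minFlips
-- ===== SOURCE A (Python) =====
-- def minFlips(a: int, b: int, c: int) -> int:
--     count = 0
--     while a or b or c:
--         odd = a % 2 or b % 2
--         even = not odd
--         if c % 2:
--             if even:
--                 count += 1
--         else:
--             if a % 2:
--                 count += 1
--             if b % 2:
--                 count += 1
--         a >>= 1
--         b >>= 1
--         c >>= 1
--     return count
-- ===== SOURCE B (Python) =====
-- def minFlips(a: int, b: int, c: int) -> int:
--     return (a & ~c).bit_count() + (b & ~c).bit_count() + (c & ~(a | b)).bit_count()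
-- ===== Notes on version B (the rewrite author's own statement) =====
-- stated objective: idiomatic
-- what changed: Replaces A's bit-by-bit while loop with a single closed-form bitwise expression: popcounts of a&~c, b&~c and c&~(a|b); Pre_ excludes negative arguments, on which A's loop never terminates.
import Mathlib
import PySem

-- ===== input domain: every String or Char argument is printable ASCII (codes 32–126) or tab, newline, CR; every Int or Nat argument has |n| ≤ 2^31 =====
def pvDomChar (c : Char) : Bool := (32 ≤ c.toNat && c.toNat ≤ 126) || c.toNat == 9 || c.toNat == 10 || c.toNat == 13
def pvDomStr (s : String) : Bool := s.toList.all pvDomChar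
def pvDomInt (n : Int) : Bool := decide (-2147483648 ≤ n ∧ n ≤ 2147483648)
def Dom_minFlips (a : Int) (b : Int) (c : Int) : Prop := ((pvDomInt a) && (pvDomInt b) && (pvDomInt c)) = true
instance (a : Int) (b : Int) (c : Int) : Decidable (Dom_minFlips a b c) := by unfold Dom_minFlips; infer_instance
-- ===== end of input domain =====

-- B replaces A's bit-by-bit while loop with one closed-form bitwise popcount expression (idiomatic).
-- Pre_ excludes negative arguments: there A's while loop never terminates (a >> 1 stays -1), so A returns no value.


-- ===== PORT A =====
-- the while loop, made total with a fuel argument; on Pre_ (nonnegative a b c) the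
-- fuel a.natAbs+b.natAbs+c.natAbs is enough, so this is exactly A's loop
def minFlipsLoop : Nat → Int → Int → Int → Int → Int
  | 0, _, _, _, count => count
  | fuel + 1, a, b, c, count =>
    if a ≠ 0 ∨ b ≠ 0 ∨ c ≠ 0 then
      let odd : Bool := (PySem.Int.mod a 2 != 0) || (PySem.Int.mod b 2 != 0)
      let even : Bool := !odd
      let count1 : Int :=
        if PySem.Int.mod c 2 ≠ 0 then
          if even then count + 1 else count
        else
          let count' := if PySem.Int.mod a 2 ≠ 0 then count + 1 else count
          if PySem.Int.mod b 2 ≠ 0 then count' + 1 else count'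
      minFlipsLoop fuel (PySem.Int.floordiv a 2) (PySem.Int.floordiv b 2)
        (PySem.Int.floordiv c 2) count1
    else count

def minFlips (a : Int) (b : Int) (c : Int) : Int :=
  minFlipsLoop (a.natAbs + b.natAbs + c.natAbs) a b c 0

-- ===== PORT B =====
def minFlips_alt (a : Int) (b : Int) (c : Int) : Int :=
  (PySem.Int.bitCount (PySem.Int.band a (Int.not c)) : Int)
    + (PySem.Int.bitCount (PySem.Int.band b (Int.not c)) : Int)
    + (PySem.Int.bitCount (PySem.Int.band c (Int.not (PySem.Int.bor a b))) : Int)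

-- ===== PRECONDITION & SPEC =====
-- Pre_ excludes negative arguments: on any negative argument A's while loop never terminates
-- (right-shifting a negative int converges to -1, which stays truthy), so A returns nothing there.
def Pre_minFlips (a : Int) (b : Int) (c : Int) : Prop := 0 ≤ a ∧ 0 ≤ b ∧ 0 ≤ c
instance (a : Int) (b : Int) (c : Int) : Decidable (Pre_minFlips a b c) := by unfold Pre_minFlips; infer_instance
def pvWitness_minFlips : Int × Int × Int := (2, 6, 5)

def Spec_minFlips (a : Int) (b : Int) (c : Int) (out : Int) : Prop := out = minFlips_alt a b c
instance (a : Int) (b : Int) (c : Int) (out : Int) : Decidable (Spec_minFlips a b c out) := by unfold Spec_minFlips; infer_instance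

-- ===== CLAIM (what is proved, stated in full; the proofs are below) =====
def Claim_equal_minFlips : Prop := ∀ (a : Int) (b : Int) (c : Int), Dom_minFlips a b c → Pre_minFlips a b c → Spec_minFlips a b c (minFlips a b c)

-- ===== LEMMAS AND PROOFS =====

-- Nat-level value of one popcount operand: m & ~k has the value m - (m &&& k)
def offBits (m k : Nat) : Nat := m - (m &&& k)

theorem not_natCast (k : Nat) : Int.not (k : Int) = Int.negSucc k := rfl

theorem band_not_natCast (m k : Nat) :
    PySem.Int.band (m : Int) (Int.not (k : Int)) = (offBits m k : Int) := by
  rw [not_natCast]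
  simp [PySem.Int.band, offBits]

theorem offBits_mod_two (m k : Nat) :
    offBits m k % 2 = if m % 2 = 1 ∧ k % 2 = 0 then 1 else 0 := by
  have hA := @Nat.and_mod_two_eq_one m k
  have hd : (m &&& k) / 2 = m / 2 &&& k / 2 := Nat.and_div_two
  have h1 : m &&& k ≤ m := Nat.and_le_left
  have h2 : m / 2 &&& k / 2 ≤ m / 2 := Nat.and_le_left
  unfold offBits
  split_ifs <;> omega

theorem offBits_div_two (m k : Nat) :
    offBits m k / 2 = offBits (m / 2) (k / 2) := by
  have hA := @Nat.and_mod_two_eq_one m k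
  have hd : (m &&& k) / 2 = m / 2 &&& k / 2 := Nat.and_div_two
  have h1 : m &&& k ≤ m := Nat.and_le_left
  have h2 : m / 2 &&& k / 2 ≤ m / 2 := Nat.and_le_left
  unfold offBits
  omega

-- the closed form, on Nat triples
def FN (m n k : Nat) : Nat :=
  PySem.Int.bitCount (offBits m k : Int) + PySem.Int.bitCount (offBits n k : Int)
    + PySem.Int.bitCount (offBits k (m ||| n) : Int)

theorem alt_eq_FN (m n k : Nat) :
    minFlips_alt (m : Int) (n : Int) (k : Int) = (FN m n k : Int) := by
  unfold minFlips_alt FN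
  rw [PySem.Int.bor_natCast, band_not_natCast, band_not_natCast, band_not_natCast]
  push_cast
  ring

theorem bitCount_rec (x : Nat) :
    PySem.Int.bitCount (x : Int) = x % 2 + PySem.Int.bitCount ((x / 2 : Nat) : Int) := by
  rcases Nat.eq_zero_or_pos x with h | h
  · subst h; simp [PySem.Int.bitCount_zero]
  · exact PySem.Int.bitCount_natCast h

theorem FN_rec (m n k : Nat) :
    FN m n k =
      (if k % 2 = 1 then (if m % 2 = 0 ∧ n % 2 = 0 then 1 else 0)
       else m % 2 + n % 2) + FN (m / 2) (n / 2) (k / 2) := by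
  unfold FN
  rw [bitCount_rec (offBits m k), bitCount_rec (offBits n k), bitCount_rec (offBits k (m ||| n))]
  rw [offBits_mod_two, offBits_mod_two, offBits_mod_two,
      offBits_div_two, offBits_div_two, offBits_div_two, Nat.or_div_two]
  have hor : (m ||| n) % 2 = 1 ↔ m % 2 = 1 ∨ n % 2 = 1 := Nat.or_mod_two_eq_one
  split_ifs <;> omega

theorem FN_zero : FN 0 0 0 = 0 := by decide

theorem mod_natCast_two (m : Nat) : PySem.Int.mod (m : Int) 2 = ((m % 2 : Nat) : Int) :=
  PySem.Int.mod_natCast m 2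

theorem floordiv_natCast_two (m : Nat) :
    PySem.Int.floordiv (m : Int) 2 = ((m / 2 : Nat) : Int) := by
  exact_mod_cast PySem.Int.floordiv_natCast m 2

theorem loop_eq (fuel : Nat) : ∀ (m n k : Nat) (count : Int), m + n + k ≤ fuel →
    minFlipsLoop fuel (m : Int) (n : Int) (k : Int) count = count + (FN m n k : Int) := by
  induction fuel with
  | zero =>
    intro m n k count h
    have : m = 0 ∧ n = 0 ∧ k = 0 := by omega
    obtain ⟨rfl, rfl, rfl⟩ := this
    simp [minFlipsLoop, FN_zero]
  | succ f ih =>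
    intro m n k count h
    by_cases hz : (m : Int) ≠ 0 ∨ (n : Int) ≠ 0 ∨ (k : Int) ≠ 0
    · have hpos : 0 < m + n + k := by
        rcases hz with h1 | h1 | h1 <;> omega
      rw [minFlipsLoop]
      simp only [hz, if_pos]
      rw [mod_natCast_two, mod_natCast_two, mod_natCast_two,
          floordiv_natCast_two, floordiv_natCast_two, floordiv_natCast_two,
          ih (m / 2) (n / 2) (k / 2) _ (by omega)]
      rw [FN_rec m n k]
      rcases Nat.mod_two_eq_zero_or_one m with hm | hm <;>
        rcases Nat.mod_two_eq_zero_or_one n with hn | hn <;>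
        rcases Nat.mod_two_eq_zero_or_one k with hk | hk <;>
        simp [hm, hn, hk] <;> omega
    · push Not at hz
      obtain ⟨h1, h2, h3⟩ := hz
      have : m = 0 ∧ n = 0 ∧ k = 0 := by
        refine ⟨?_, ?_, ?_⟩ <;> omega
      obtain ⟨rfl, rfl, rfl⟩ := this
      rw [minFlipsLoop]
      simp [FN_zero]

-- ===== VERDICT (by name: the statement is the Claim_ definition above) =====
theorem minFlips_spec : Claim_equal_minFlips := by
  intro a b c _hd hpre
  obtain ⟨ha, hb, hc⟩ := hpre
  obtain ⟨m, rfl⟩ := Int.eq_ofNat_of_zero_le ha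
  obtain ⟨n, rfl⟩ := Int.eq_ofNat_of_zero_le hb
  obtain ⟨k, rfl⟩ := Int.eq_ofNat_of_zero_le hc
  unfold Spec_minFlips minFlips
  rw [alt_eq_FN]
  simp only [Int.natAbs_natCast]
  rw [loop_eq (m + n + k) m n k 0 le_rfl]
  ring
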